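-- pv_equiv track=rewrite | github.com/Qlwentt/leetcode-quai | 2433-find-the-original-array-of-prefix-xor/2433-find-the-original-array-of-prefix-xor.py | findArray
-- ===== SOURCE A (Python) =====
-- from typing import List
--
-- def findArray(pref: List[int]) -> List[int]:
--     prev = 0
--     answer = []
--     for num in pref:
--         next_ = prev ^ num
--         prev = prev ^ next_
--         answer.append(next_)
--
--     return answer
-- ===== SOURCE B (Python) =====
-- from typing import List
--
-- def findArray(pref: List[int]) -> List[int]:
--     stack = list(pref)
--     out = []
--     while len(stack) > 1:
--         top = stack.pop()
--         out.append(stack[-1] ^ top)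
--     out.extend(stack)
--     out.reverse()
--     return out
-- ===== Notes on version B (the rewrite author's own statement) =====
-- stated objective: alternative
-- what changed: Replaces A's forward accumulator loop threading a running prev through XOR updates with a stack popped from the end: each popped top is XORed with the element now on top, results collected back-to-front and reversed at the end, with no running state.
import Mathlib
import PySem

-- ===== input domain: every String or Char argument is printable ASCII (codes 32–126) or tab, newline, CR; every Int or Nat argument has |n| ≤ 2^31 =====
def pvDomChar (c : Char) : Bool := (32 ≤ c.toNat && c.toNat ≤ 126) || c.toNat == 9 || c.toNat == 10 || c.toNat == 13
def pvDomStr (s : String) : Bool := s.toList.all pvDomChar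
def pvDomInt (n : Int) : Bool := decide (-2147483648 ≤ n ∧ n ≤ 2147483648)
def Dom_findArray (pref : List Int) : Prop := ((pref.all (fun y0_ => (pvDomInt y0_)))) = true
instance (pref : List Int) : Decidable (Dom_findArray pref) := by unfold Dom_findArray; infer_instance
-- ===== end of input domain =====

-- B replaces A's forward accumulator loop (running prev) with a stack popped from the
-- end: each popped top is XORed with the element now exposed on top, the results are
-- collected back-to-front and reversed at the end; no running XOR state is threaded.

-- ===== PORT A =====
-- literal transliteration of A: loop state (prev, answer), answer appended at the back
def findArray (pref : List Int) : List Int :=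
  (pref.foldl (fun (st : Int × List Int) num =>
    let next_ := PySem.Int.bxor st.1 num
    let prev := PySem.Int.bxor st.1 next_
    (prev, st.2 ++ [next_])) (0, [])).2

-- ===== PORT B =====
-- the while loop of Source B; the stack is represented REVERSED (head = Python's stack top),
-- so stack.pop() = peel the head and stack[-1] = the new head; exact step for step
def goB : List Int → List Int → List Int
  | t :: s :: rest, out => goB (s :: rest) (out ++ [PySem.Int.bxor s t])
  | st, out => out ++ st          -- len(stack) <= 1: out.extend(stack)

-- literal transliteration of B: stack := copy of pref (reversed representation),
-- run the pop loop, then out.reverse()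
def findArray_alt (pref : List Int) : List Int :=
  (goB pref.reverse []).reverse

-- ===== PRECONDITION & SPEC =====
def Spec_findArray (pref : List Int) (out : List Int) : Prop := out = findArray_alt pref
instance (pref : List Int) (out : List Int) : Decidable (Spec_findArray pref out) := by unfold Spec_findArray; infer_instance

-- ===== CLAIM (what is proved, stated in full; the proofs are below) =====
def Claim_equal_findArray : Prop := ∀ (pref : List Int), Dom_findArray pref → Spec_findArray pref (findArray pref)

-- ===== LEMMAS AND PROOFS =====
theorem bxor_xor_cancel (a x : Int) : PySem.Int.bxor a (PySem.Int.bxor a x) = x := by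
  unfold PySem.Int.bxor
  by_cases h1 : 0 ≤ a <;> by_cases h2 : 0 ≤ x <;> simp [h1, h2] <;>
    (try split_ifs) <;> (try intro h) <;> omega

-- the canonical value both programs compute
def canon (pref : List Int) : List Int :=
  List.zipWith (fun a b => PySem.Int.bxor a b) pref (0 :: pref)

-- A-side loop invariant
theorem findArray_loop (pref : List Int) (prev : Int) (acc : List Int) :
    (pref.foldl (fun (st : Int × List Int) num =>
      let next_ := PySem.Int.bxor st.1 num
      let prev := PySem.Int.bxor st.1 next_
      (prev, st.2 ++ [next_])) (prev, acc)).2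
      = acc ++ List.zipWith (fun a b => PySem.Int.bxor a b) pref (prev :: pref) := by
  induction pref generalizing prev acc with
  | nil => simp
  | cons x xs ih =>
      simp only [List.foldl_cons, List.zipWith_cons_cons]
      rw [ih, bxor_xor_cancel, PySem.Int.bxor_comm]
      simp

-- B-side: the pure result of the pop loop
def RB : List Int → List Int
  | t :: s :: rest => PySem.Int.bxor s t :: RB (s :: rest)
  | st => st

theorem goB_eq_RB (r out : List Int) : goB r out = out ++ RB r := by
  induction r generalizing out with
  | nil => simp [goB, RB]
  | cons t tl ih =>
      cases tl with
      | nil => simp [goB, RB]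
      | cons s rest => simp [goB, RB, ih]

-- appending one element to the front list shifts one XOR into canon
theorem canon_step (q : List Int) (z t : Int) :
    List.zipWith (fun a b => PySem.Int.bxor a b) (q ++ [t]) (z :: (q ++ [t]))
      = List.zipWith (fun a b => PySem.Int.bxor a b) q (z :: q)
        ++ [PySem.Int.bxor t (q.getLastD z)] := by
  induction q generalizing z with
  | nil => simp
  | cons a as ih =>
      simp only [List.cons_append, List.zipWith_cons_cons, ih a]
      rw [List.getLastD_cons]

theorem RB_eq (r : List Int) : RB r = (canon r.reverse).reverse := by
  induction r with
  | nil => simp [RB, canon]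
  | cons t tl ih =>
      cases tl with
      | nil => simp [RB, canon]
      | cons s rest =>
          have hq : ((rest.reverse ++ [s])).getLastD 0 = s := by
            rw [List.getLastD_eq_getLast?, show rest.reverse ++ [s] = (s :: rest).reverse by simp,
              List.getLast?_reverse]; rfl
          have hr : (t :: s :: rest).reverse = (s :: rest).reverse ++ [t] := by simp
          simp only [RB, ih, canon, hr, canon_step, List.reverse_append,
            List.reverse_cons, List.reverse_nil, List.nil_append, List.cons_append]
          rw [hq, PySem.Int.bxor_comm]

theorem RB_reverse (pref : List Int) :
    RB pref.reverse = (canon pref).reverse := by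
  rw [RB_eq, List.reverse_reverse]

-- ===== VERDICT (by name: the statement is the Claim_ definition above) =====
theorem findArray_spec : Claim_equal_findArray := by
  intro pref _
  unfold Spec_findArray findArray findArray_alt
  rw [findArray_loop, goB_eq_RB, RB_reverse]
  simp [canon]
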